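-- pv_equiv track=rewrite | github.com/SchemaBio/schema-germline | scripts/vep_report.py | parse_genotype
-- ===== SOURCE A (Python) =====
-- def parse_genotype(format_str, sample_str):
--     """Parse genotype from FORMAT and sample columns"""
--     if not format_str or not sample_str:
--         return '.', '.', '.', '.', '.'
--
--     format_fields = format_str.split(':')
--     sample_values = sample_str.split(':')
--
--     gt = '.'
--     ad = '.'
--     dp = '.'
--     vaf = '.'
--     ps = '.'
--
--     for i, field in enumerate(format_fields):
--         if i < len(sample_values):
--             if field == 'GT':
--                 gt = sample_values[i]
--             elif field == 'AD':
--                 ad = sample_values[i]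
--             elif field == 'DP':
--                 dp = sample_values[i]
--             elif field == 'VAF':
--                 vaf = sample_values[i]
--             elif field == 'PS':
--                 ps = sample_values[i]
--
--     return gt, ad, dp, vaf, ps
-- ===== SOURCE B (Python) =====
-- def parse_genotype(format_str, sample_str):
--     """Parse genotype from FORMAT and sample columns"""
--     if not format_str or not sample_str:
--         return '.', '.', '.', '.', '.'
--     pairs = list(zip(format_str.split(':'), sample_str.split(':')))
--
--     def last(key):
--         # search back-to-front, first hit wins (= last occurrence forward)
--         for k, v in reversed(pairs):
--             if k == key:
--                 return v
--         return '.'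
--
--     return last('GT'), last('AD'), last('DP'), last('VAF'), last('PS')
-- ===== Notes on version B (the rewrite author's own statement) =====
-- stated objective: alternative
-- what changed: Replaces A's single forward pass with five accumulator variables and a five-way if/elif branch by five independent back-to-front searches with early return over the zipped (field,value) pairs: each key is answered by the first match found scanning in reverse, which equals A's last-overwrite.
import Mathlib
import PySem

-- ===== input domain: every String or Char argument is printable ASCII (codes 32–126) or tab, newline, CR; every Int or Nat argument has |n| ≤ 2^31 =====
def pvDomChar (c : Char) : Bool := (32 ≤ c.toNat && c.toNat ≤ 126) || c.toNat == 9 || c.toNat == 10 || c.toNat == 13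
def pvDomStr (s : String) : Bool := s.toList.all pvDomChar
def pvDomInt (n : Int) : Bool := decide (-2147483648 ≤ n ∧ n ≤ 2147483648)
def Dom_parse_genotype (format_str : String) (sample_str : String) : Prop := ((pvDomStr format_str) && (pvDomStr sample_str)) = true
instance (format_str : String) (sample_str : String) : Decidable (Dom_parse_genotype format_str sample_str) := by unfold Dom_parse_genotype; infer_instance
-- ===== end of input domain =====

-- B replaces A's single forward accumulate-with-branches pass by five independent
-- back-to-front early-return searches over the zipped pairs (alternative; same cost).

-- ===== PORT A =====
-- A's loop body over (i, field); sample_values[i] is only read under the guard i < len(sample_values),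
-- so pyGetD is exact there.
def pvStepA (sample_values : List String) (st : String × String × String × String × String)
    (p : Int × String) : String × String × String × String × String :=
  match st, p with
  | (gt, ad, dp, vaf, ps), (i, field) =>
    if i < (sample_values.length : Int) then
      if field == "GT" then (PySem.List.pyGetD sample_values i gt, ad, dp, vaf, ps)
      else if field == "AD" then (gt, PySem.List.pyGetD sample_values i ad, dp, vaf, ps)
      else if field == "DP" then (gt, ad, PySem.List.pyGetD sample_values i dp, vaf, ps)
      else if field == "VAF" then (gt, ad, dp, PySem.List.pyGetD sample_values i vaf, ps)
      else if field == "PS" then (gt, ad, dp, vaf, PySem.List.pyGetD sample_values i ps)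
      else (gt, ad, dp, vaf, ps)
    else (gt, ad, dp, vaf, ps)

def parse_genotype (format_str : String) (sample_str : String) : String × String × String × String × String :=
  if format_str == "" || sample_str == "" then (".", ".", ".", ".", ".")
  else
    let format_fields := (PySem.Str.split? format_str ":").getD []   -- sep ":" ≠ "", so split? is some
    let sample_values := (PySem.Str.split? sample_str ":").getD []
    (PySem.List.enumerate format_fields).foldl (pvStepA sample_values) (".", ".", ".", ".", ".")

-- ===== PORT B =====
-- B's inner 'for k, v in reversed(pairs): if k == key: return v / else ".":
-- first match scanning the reversed pair list, i.e. findSome? on pairs.reverse.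
def pvLast (pairs : List (String × String)) (key : String) : String :=
  (pairs.reverse.findSome? (fun p => if p.1 == key then some p.2 else none)).getD "."

def parse_genotype_alt (format_str : String) (sample_str : String) : String × String × String × String × String :=
  if format_str == "" || sample_str == "" then (".", ".", ".", ".", ".")
  else
    let pairs := ((PySem.Str.split? format_str ":").getD []).zip ((PySem.Str.split? sample_str ":").getD [])
    (pvLast pairs "GT", pvLast pairs "AD", pvLast pairs "DP", pvLast pairs "VAF", pvLast pairs "PS")

-- ===== PRECONDITION & SPEC =====
def Spec_parse_genotype (format_str : String) (sample_str : String) (out : String × String × String × String × String) : Prop := out = parse_genotype_alt format_str sample_str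
instance (format_str : String) (sample_str : String) (out : String × String × String × String × String) : Decidable (Spec_parse_genotype format_str sample_str out) := by unfold Spec_parse_genotype; infer_instance

-- ===== CLAIM (what is proved, stated in full; the proofs are below) =====
def Claim_equal_parse_genotype : Prop := ∀ (format_str : String) (sample_str : String), Dom_parse_genotype format_str sample_str → Spec_parse_genotype format_str sample_str (parse_genotype format_str sample_str)

-- ===== LEMMAS AND PROOFS =====

-- step over an already-paired (field, value)
def pvStepP (st : String × String × String × String × String) (p : String × String) :
    String × String × String × String × String :=
  match st, p with
  | (gt, ad, dp, vaf, ps), (field, v) =>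
    if field == "GT" then (v, ad, dp, vaf, ps)
    else if field == "AD" then (gt, v, dp, vaf, ps)
    else if field == "DP" then (gt, ad, v, vaf, ps)
    else if field == "VAF" then (gt, ad, dp, v, ps)
    else if field == "PS" then (gt, ad, dp, vaf, v)
    else (gt, ad, dp, vaf, ps)

-- A's guarded index loop from position j equals a fold over the zip with the remaining sample values.
theorem pv_fold_enum_eq_zip (ff : List String) (j : Nat) (ss : List String)
    (st : String × String × String × String × String) :
    (PySem.List.enumerate ff (j : Int)).foldl (pvStepA ss) st
      = (ff.zip (ss.drop j)).foldl pvStepP st := by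
  induction ff generalizing j st with
  | nil => simp [PySem.List.enumerate]
  | cons f ft ih =>
    rw [PySem.List.enumerate_cons, List.foldl_cons]
    by_cases h : j < ss.length
    · have hdrop : ss.drop j = ss[j] :: ss.drop (j + 1) := List.drop_eq_getElem_cons h
      have hstep : pvStepA ss st ((j : Int), f) = pvStepP st (f, ss[j]) := by
        simp [pvStepA, pvStepP, h, PySem.List.pyGetD_ofNat ss j _ h]
      rw [hstep, hdrop, List.zip_cons_cons, List.foldl_cons]
      have := ih (j + 1) (pvStepP st (f, ss[j]))
      push_cast at this
      exact this
    · have hdrop : ss.drop j = [] := List.drop_eq_nil_of_le (by omega)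
      have hdrop' : ss.drop (j + 1) = [] := List.drop_eq_nil_of_le (by omega)
      have hstep : pvStepA ss st ((j : Int), f) = st := by
        simp [pvStepA]
        omega
      rw [hstep, hdrop]
      have := ih (j + 1) st
      rw [hdrop'] at this
      simpa using this

def pvF (key : String) : String × String → Option String :=
  fun p => if p.1 == key then some p.2 else none

-- the forward last-wins fold equals, per component, the first match of a backwards search
theorem pv_fold_eq_revfind (L : List (String × String)) (g a d v s : String) :
    L.foldl pvStepP (g, a, d, v, s)
      = ((L.reverse.findSome? (pvF "GT")).getD g,
         (L.reverse.findSome? (pvF "AD")).getD a,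
         (L.reverse.findSome? (pvF "DP")).getD d,
         (L.reverse.findSome? (pvF "VAF")).getD v,
         (L.reverse.findSome? (pvF "PS")).getD s) := by
  induction L generalizing g a d v s with
  | nil => simp
  | cons q L ih =>
    obtain ⟨k, val⟩ := q
    have hstep : pvStepP (g, a, d, v, s) (k, val)
        = ((pvF "GT" (k, val)).getD g, (pvF "AD" (k, val)).getD a,
           (pvF "DP" (k, val)).getD d, (pvF "VAF" (k, val)).getD v,
           (pvF "PS" (k, val)).getD s) := by
      simp only [pvStepP, pvF, beq_iff_eq]
      by_cases h1 : k = "GT" <;> by_cases h2 : k = "AD" <;> by_cases h3 : k = "DP" <;>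
        by_cases h4 : k = "VAF" <;> by_cases h5 : k = "PS" <;> simp_all
    rw [List.foldl_cons, hstep, ih]
    have hone : ∀ key old, (((L.reverse ++ [(k, val)]).findSome? (pvF key)).getD old)
        = ((L.reverse.findSome? (pvF key)).getD ((pvF key (k, val)).getD old)) := by
      intro key old
      rw [List.findSome?_append]
      cases hfs : L.reverse.findSome? (pvF key) <;> simp
    simp only [List.reverse_cons, hone]
-- ===== VERDICT (by name: the statement is the Claim_ definition above) =====
theorem parse_genotype_spec : Claim_equal_parse_genotype := by
  intro format_str sample_str _
  unfold Spec_parse_genotype parse_genotype parse_genotype_alt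
  by_cases h : format_str == "" || sample_str == ""
  · simp [h]
  · simp only [h, if_false, Bool.false_eq_true]
    set ff := (PySem.Str.split? format_str ":").getD [] with hff
    set ss := (PySem.Str.split? sample_str ":").getD [] with hss
    have h0 : (PySem.List.enumerate ff 0).foldl (pvStepA ss) (".", ".", ".", ".", ".")
        = (ff.zip ss).foldl pvStepP (".", ".", ".", ".", ".") := by
      have := pv_fold_enum_eq_zip ff 0 ss (".", ".", ".", ".", ".")
      simpa using this
    rw [h0, pv_fold_eq_revfind]
    rfl
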